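-- pv_equiv track=rewrite | github.com/victorfernandezesp/PRIA_Ejercicios_De_Iniciacion | Python/06-Funciones/Ejercicio08.py | sumador
-- ===== SOURCE A (Python) =====
-- def sumador(num: int):
--     if num <= 5:
--         return 0
--     else:
--         suma = 0
--         for i in range(1, num + 1):
--             if i != num - 1 and i != num - 3:
--                 suma += i
--         return suma
-- ===== SOURCE B (Python) =====
-- def sumador(num: int):
--     if num <= 5:
--         return 0
--     return num * (num + 1) // 2 - (num - 1) - (num - 3)
-- ===== Notes on version B (the rewrite author's own statement) =====
-- stated objective: faster
-- what changed: Replaced the O(n) filtering loop over range(1, num+1) with the closed-form triangular number num*(num+1)//2 minus the two excluded terms num-1 and num-3.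
import Mathlib
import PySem

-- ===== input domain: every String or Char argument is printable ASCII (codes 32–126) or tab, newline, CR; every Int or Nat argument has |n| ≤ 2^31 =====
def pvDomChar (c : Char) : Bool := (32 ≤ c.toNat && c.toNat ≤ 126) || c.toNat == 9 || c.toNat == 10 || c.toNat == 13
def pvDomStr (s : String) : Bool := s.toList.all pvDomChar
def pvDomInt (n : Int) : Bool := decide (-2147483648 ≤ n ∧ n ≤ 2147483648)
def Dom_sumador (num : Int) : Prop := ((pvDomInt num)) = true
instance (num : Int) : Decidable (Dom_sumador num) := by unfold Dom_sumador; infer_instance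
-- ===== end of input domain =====

-- B replaces A's O(n) filtering loop by the closed form num*(num+1)//2 - (num-1) - (num-3): faster (asymptotic).

-- ===== PORT A =====
def sumador (num : Int) : Int :=
  if num ≤ 5 then 0
  else
    (PySem.List.pyRange 1 (num + 1) 1).foldl
      (fun suma i => if i ≠ num - 1 ∧ i ≠ num - 3 then suma + i else suma) 0

-- ===== PORT B =====
def sumador_alt (num : Int) : Int :=
  if num ≤ 5 then 0
  else PySem.Int.floordiv (num * (num + 1)) 2 - (num - 1) - (num - 3)

-- ===== PRECONDITION & SPEC =====
def Spec_sumador (num : Int) (out : Int) : Prop := out = sumador_alt num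
instance (num : Int) (out : Int) : Decidable (Spec_sumador num out) := by unfold Spec_sumador; infer_instance

-- ===== CLAIM (what is proved, stated in full; the proofs are below) =====
def Claim_equal_sumador : Prop := ∀ (num : Int), Dom_sumador num → Spec_sumador num (sumador num)

-- ===== LEMMAS AND PROOFS =====

-- triangular numbers, loop-shaped
def pvTri : Nat → Int
  | 0 => 0
  | m + 1 => pvTri m + (m + 1)

theorem pvTri_double (m : Nat) : 2 * pvTri m = (m : Int) * ((m : Int) + 1) := by
  induction m with
  | zero => simp [pvTri]
  | succ k ih => simp only [pvTri]; push_cast; push_cast at ih; ring_nf; ring_nf at ih; omega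

theorem pv_loop_sum (num : Int) (m : Nat) (s : Int) :
    (PySem.List.pyRange 1 ((m : Int) + 1) 1).foldl
      (fun suma i => if i ≠ num - 1 ∧ i ≠ num - 3 then suma + i else suma) s
    = s + pvTri m
      - (if 1 ≤ num - 1 ∧ num - 1 ≤ (m : Int) then num - 1 else 0)
      - (if 1 ≤ num - 3 ∧ num - 3 ≤ (m : Int) then num - 3 else 0) := by
  induction m generalizing s with
  | zero =>
    rw [PySem.List.pyRange_one_eq_nil (by norm_num)]
    simp only [List.foldl_nil, pvTri]
    split_ifs <;> omega
  | succ k ih =>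
    have h : ((k + 1 : Nat) : Int) + 1 = ((k : Int) + 1) + 1 := by push_cast; ring
    rw [h, PySem.List.pyRange_one_succ_right (by omega), List.foldl_append]
    simp only [List.foldl_cons, List.foldl_nil]
    rw [ih]
    simp only [pvTri]
    push_cast
    split_ifs <;> omega

-- ===== VERDICT (by name: the statement is the Claim_ definition above) =====
theorem sumador_spec : Claim_equal_sumador := by
  intro num _
  unfold Spec_sumador sumador sumador_alt
  by_cases h : num ≤ 5
  · simp [h]
  · simp only [h, if_false]
    have hm : num = ((num.toNat : Int)) := by omega
    rw [hm, pv_loop_sum]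
    have htri : PySem.Int.floordiv ((num.toNat : Int) * ((num.toNat : Int) + 1)) 2 = pvTri num.toNat := by
      rw [PySem.Int.floordiv_eq_ediv_of_pos (by norm_num), ← pvTri_double num.toNat]
      exact Int.mul_ediv_cancel_left _ (by norm_num)
    rw [htri]
    split_ifs <;> omega
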